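-- pv_equiv track=rewrite | github.com/stefanh-it/adventofcode24 | 2024_python/day05/p1.py | check_after
-- ===== SOURCE A (Python) =====
-- def check_after(value: int, rules: list[tuple[int, int]], after: list[int]):
--     if after == []:
--         return True
--     for rule in rules:
--         for check_value in after:
--             if value == rule[1] and check_value == rule[0]:
--                 return False
--     return True
-- ===== SOURCE B (Python) =====
-- def check_after(value: int, rules: list[tuple[int, int]], after: list[int]):
--     forbidden = {a for (a, b) in rules if b == value}
--     return forbidden.isdisjoint(after)
-- ===== Notes on version B (the rewrite author's own statement) =====
-- stated objective: faster
-- what changed: Builds a predecessor set from the rules once and decides by a single disjointness test over `after`, replacing the nested rules-by-after scan and the explicit empty-after guard.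
import Mathlib
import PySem

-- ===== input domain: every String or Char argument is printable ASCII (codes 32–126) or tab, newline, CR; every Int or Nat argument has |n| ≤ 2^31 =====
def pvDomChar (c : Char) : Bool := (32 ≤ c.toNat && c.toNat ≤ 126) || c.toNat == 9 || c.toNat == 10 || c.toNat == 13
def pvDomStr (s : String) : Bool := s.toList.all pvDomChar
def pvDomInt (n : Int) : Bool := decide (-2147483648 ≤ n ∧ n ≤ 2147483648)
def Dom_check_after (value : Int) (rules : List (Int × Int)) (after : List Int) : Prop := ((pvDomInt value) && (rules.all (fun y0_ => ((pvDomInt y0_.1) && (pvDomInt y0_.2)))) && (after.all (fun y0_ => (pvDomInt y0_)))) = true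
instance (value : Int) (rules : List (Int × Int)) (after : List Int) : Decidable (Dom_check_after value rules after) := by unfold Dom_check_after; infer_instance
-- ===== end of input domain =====

-- B replaces A's nested rules-by-after scan with a predecessor set built from the rules once
-- plus a single disjointness test over `after` (alternative decomposition, same results).

-- ===== PORT A =====
-- inner 'for check_value in after' loop: true = violation found (Python's 'return False')
def pvInnerA (value : Int) (rule : Int × Int) : List Int → Bool
  | [] => false
  | c :: rest => if value == rule.2 && c == rule.1 then true else pvInnerA value rule rest

-- outer 'for rule in rules' loop
def pvOuterA (value : Int) (after : List Int) : List (Int × Int) → Bool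
  | [] => true
  | r :: rest => if pvInnerA value r after then false else pvOuterA value after rest

def check_after (value : Int) (rules : List (Int × Int)) (after : List Int) : Bool :=
  if after = [] then true else pvOuterA value after rules

-- ===== PORT B =====
def check_after_alt (value : Int) (rules : List (Int × Int)) (after : List Int) : Bool :=
  let forbidden : PySem.Set Int :=
    PySem.Set.ofList ((rules.filter (fun r => r.2 == value)).map Prod.fst)
  PySem.Set.isdisjoint forbidden after

-- ===== PRECONDITION & SPEC =====
def Spec_check_after (value : Int) (rules : List (Int × Int)) (after : List Int) (out : Bool) : Prop := out = check_after_alt value rules after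
instance (value : Int) (rules : List (Int × Int)) (after : List Int) (out : Bool) : Decidable (Spec_check_after value rules after out) := by unfold Spec_check_after; infer_instance

-- ===== CLAIM (what is proved, stated in full; the proofs are below) =====
def Claim_equal_check_after : Prop := ∀ (value : Int) (rules : List (Int × Int)) (after : List Int), Dom_check_after value rules after → Spec_check_after value rules after (check_after value rules after)

-- ===== LEMMAS AND PROOFS =====
theorem pvInnerA_eq_true (value : Int) (rule : Int × Int) (after : List Int) :
    pvInnerA value rule after = true ↔ value = rule.2 ∧ rule.1 ∈ after := by
  induction after with
  | nil => simp [pvInnerA]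
  | cons c rest ih =>
    simp only [pvInnerA, List.mem_cons]
    split_ifs with h
    · simp only [Bool.and_eq_true, beq_iff_eq] at h
      simp [h.1, h.2.symm]
    · simp only [Bool.and_eq_true, beq_iff_eq, not_and] at h
      rw [ih]
      constructor
      · rintro ⟨hv, hm⟩; exact ⟨hv, Or.inr hm⟩
      · rintro ⟨hv, hm | hm⟩
        · exact absurd hm.symm (h hv)
        · exact ⟨hv, hm⟩

theorem pvOuterA_eq_true (value : Int) (after : List Int) (rules : List (Int × Int)) :
    pvOuterA value after rules = true ↔
      ∀ r ∈ rules, ¬(value = r.2 ∧ r.1 ∈ after) := by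
  induction rules with
  | nil => simp [pvOuterA]
  | cons r rest ih =>
    simp only [pvOuterA, List.mem_cons]
    split_ifs with h
    · rw [pvInnerA_eq_true] at h
      simp only [false_iff, not_forall]
      exact ⟨r, Or.inl rfl, not_not.mpr h⟩
    · rw [pvInnerA_eq_true] at h
      rw [ih]
      constructor
      · rintro hall r' (rfl | hm)
        · exact h
        · exact hall r' hm
      · intro hall r' hm
        exact hall r' (Or.inr hm)

theorem check_after_alt_eq_true (value : Int) (rules : List (Int × Int)) (after : List Int) :
    check_after_alt value rules after = true ↔
      ∀ r ∈ rules, ¬(value = r.2 ∧ r.1 ∈ after) := by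
  unfold check_after_alt
  rw [PySem.Set.isdisjoint_iff]
  constructor
  · intro h r hr ⟨hv, hm⟩
    exact h r.1 (by
      rw [PySem.Set.mem_ofList]
      exact List.mem_map.mpr ⟨r, List.mem_filter.mpr ⟨hr, by simpa using hv.symm⟩, rfl⟩) hm
  · intro h x hx hm
    rw [PySem.Set.mem_ofList] at hx
    obtain ⟨r, hr, rfl⟩ := List.mem_map.mp hx
    have := List.mem_filter.mp hr
    exact h r this.1 ⟨(beq_iff_eq.mp this.2).symm, hm⟩

-- ===== VERDICT (by name: the statement is the Claim_ definition above) =====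
theorem check_after_spec : Claim_equal_check_after := by
  intro value rules after _
  unfold Spec_check_after check_after
  split_ifs with h
  · subst h
    rw [Eq.comm, check_after_alt_eq_true]
    simp
  · rw [Bool.eq_iff_iff, pvOuterA_eq_true, check_after_alt_eq_true]
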